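-- pv_equiv track=rewrite | github.com/ACRLab/snazzy | pasnascope/slice_img.py | sort_by_grid_pos
-- ===== SOURCE A (Python) =====
-- def sort_by_grid_pos(extremes, n_cols):
--     '''Sorts each boundary points list based on their position in the grid.
--
--     Sorts by F-order (column-wise).'''
--     centroids = [((x0+x1)//2, (y0+y1)//2, i)
--                  for i, (x0, x1, y0, y1) in enumerate(extremes)]
--     bin_size = (max((y for (x, y, i) in centroids))//n_cols) + 1
--
--     bins = [[] for _ in range(n_cols)]
--
--     for centroid in centroids:
--         y = centroid[1]
--         bin_idx = (y)//bin_size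
--         bins[bin_idx].append(centroid)
--
--     # filter out possibly empty bins
--     bins = [b for b in bins if len(b) > 0]
--
--     for b in bins:
--         b.sort(key=lambda b: b[0])
--
--     indices = [b[-1] for bin in bins for b in bin if len(bin) > 0]
--
--     return [extremes[i] for i in indices]
-- ===== SOURCE B (Python) =====
-- def sort_by_grid_pos(extremes, n_cols):
--     '''Sorts each boundary points list based on their position in the grid.
--
--     Sorts by F-order (column-wise).'''
--     centroids = [((x0 + x1) // 2, (y0 + y1) // 2, i)
--                  for i, (x0, x1, y0, y1) in enumerate(extremes)]
--     bin_size = (max(y for (x, y, i) in centroids) // n_cols) + 1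
--     order = sorted(centroids, key=lambda c: ((c[1] // bin_size) % n_cols, c[0]))
--     return [extremes[c[2]] for c in order]
-- ===== Notes on version B (the rewrite author's own statement) =====
-- stated objective: simpler
-- what changed: A distributes centroids into per-column bins indexed by y//bin_size (with Python negative-index wraparound), sorts each bin by centroid x and flattens; B replaces the whole bin structure by one stable sort of the centroid list under the composite key ((cy//bin_size) % n_cols, cx).
import Mathlib
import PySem

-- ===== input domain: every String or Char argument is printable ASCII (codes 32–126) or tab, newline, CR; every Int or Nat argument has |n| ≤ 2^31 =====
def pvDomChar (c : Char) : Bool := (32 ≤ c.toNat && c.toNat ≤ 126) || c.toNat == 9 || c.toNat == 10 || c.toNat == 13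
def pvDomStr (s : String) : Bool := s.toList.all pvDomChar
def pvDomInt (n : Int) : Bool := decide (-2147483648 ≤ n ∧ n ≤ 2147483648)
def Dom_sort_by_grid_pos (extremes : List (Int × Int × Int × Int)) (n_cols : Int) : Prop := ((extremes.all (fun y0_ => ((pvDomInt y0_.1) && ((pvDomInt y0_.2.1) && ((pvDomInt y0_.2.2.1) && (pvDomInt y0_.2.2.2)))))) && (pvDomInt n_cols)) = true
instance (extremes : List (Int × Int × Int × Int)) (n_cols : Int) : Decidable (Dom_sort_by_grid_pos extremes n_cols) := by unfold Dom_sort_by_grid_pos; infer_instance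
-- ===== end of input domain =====

-- B replaces A's bucket-distribute / per-bucket-sort / flatten by one stable sort of the
-- centroids under the composite key (column bin, centroid x); objective: simpler.

-- shared helper: the centroid list [( (x0+x1)//2, (y0+y1)//2, i ) for i,(x0,x1,y0,y1) in enumerate(extremes)]
def pvCentroids (extremes : List (Int × Int × Int × Int)) : List (Int × Int × Int) :=
  (PySem.List.enumerate extremes 0).map
    (fun p => (PySem.Int.floordiv (p.2.1 + p.2.2.1) 2, PySem.Int.floordiv (p.2.2.2.1 + p.2.2.2.2) 2, p.1))

-- ===== PORT A =====
def sort_by_grid_pos (extremes : List (Int × Int × Int × Int)) (n_cols : Int) : List (Int × Int × Int × Int) :=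
  let centroids := pvCentroids extremes
  match PySem.List.max? (centroids.map (fun c => c.2.1)) (fun y => y) with
  | none => []  -- Python: max() of an empty sequence raises ValueError; excluded by Pre_
  | some m =>
    -- n_cols = 0 (ZeroDivisionError) and bin_size = 0 (ZeroDivisionError below) are excluded by Pre_
    let bin_size := PySem.Int.floordiv m n_cols + 1
    let bins0 : List (List (Int × Int × Int)) := (PySem.List.pyRange 0 n_cols 1).map (fun _ => [])
    let bins1 := centroids.foldl
      (fun bins centroid =>
        PySem.List.pySetD bins (PySem.Int.floordiv centroid.2.1 bin_size)
          (PySem.List.pyGetD bins (PySem.Int.floordiv centroid.2.1 bin_size) [] ++ [centroid])) bins0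
    let bins2 := bins1.filter (fun b => decide (0 < b.length))
    let bins3 := bins2.map (fun b => PySem.List.sorted b (fun c => c.1) false)
    let indices := bins3.flatMap (fun bin => (bin.filter (fun _ => decide (0 < bin.length))).map (fun b => b.2.2))
    indices.map (fun i => PySem.List.pyGetD extremes i (0, 0, 0, 0))

-- ===== PORT B =====
def sort_by_grid_pos_alt (extremes : List (Int × Int × Int × Int)) (n_cols : Int) : List (Int × Int × Int × Int) :=
  let centroids := pvCentroids extremes
  match PySem.List.max? (centroids.map (fun c => c.2.1)) (fun y => y) with
  | none => []  -- Python: max() of an empty sequence raises ValueError; excluded by Pre_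
  | some m =>
    let bin_size := PySem.Int.floordiv m n_cols + 1
    let order := PySem.List.sorted2 centroids
      (fun c => PySem.Int.mod (PySem.Int.floordiv c.2.1 bin_size) n_cols) (fun c => c.1) false
    order.map (fun c => PySem.List.pyGetD extremes c.2.2 (0, 0, 0, 0))

-- ===== PRECONDITION & SPEC =====
-- helpers for stating Pre_: A's bin_size, 0 when extremes is empty
def pvBinSize (extremes : List (Int × Int × Int × Int)) (n_cols : Int) : Int :=
  match PySem.List.max? ((pvCentroids extremes).map (fun c => c.2.1)) (fun y => y) with
  | none => 0
  | some m => PySem.Int.floordiv m n_cols + 1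

-- Exactly the inputs on which the Python A returns: extremes nonempty (max() of an empty sequence
-- raises ValueError), n_cols ≥ 1 (n_cols = 0 raises ZeroDivisionError, n_cols < 0 makes bins empty so
-- every append raises IndexError), bin_size ≠ 0 (ZeroDivisionError) and every centroid's bin index in
-- [-n_cols, n_cols) (outside, bins[bin_idx] raises IndexError).
def Pre_sort_by_grid_pos (extremes : List (Int × Int × Int × Int)) (n_cols : Int) : Prop :=
  extremes ≠ [] ∧ 1 ≤ n_cols ∧ pvBinSize extremes n_cols ≠ 0 ∧
  ∀ c ∈ pvCentroids extremes,
    -n_cols ≤ PySem.Int.floordiv c.2.1 (pvBinSize extremes n_cols) ∧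
    PySem.Int.floordiv c.2.1 (pvBinSize extremes n_cols) < n_cols
instance (extremes : List (Int × Int × Int × Int)) (n_cols : Int) : Decidable (Pre_sort_by_grid_pos extremes n_cols) := by
  unfold Pre_sort_by_grid_pos; infer_instance

def pvWitness_sort_by_grid_pos : (List (Int × Int × Int × Int)) × Int := ([(0, 2, 0, 2), (4, 6, 4, 6)], 2)

def Spec_sort_by_grid_pos (extremes : List (Int × Int × Int × Int)) (n_cols : Int) (out : List (Int × Int × Int × Int)) : Prop := out = sort_by_grid_pos_alt extremes n_cols
instance (extremes : List (Int × Int × Int × Int)) (n_cols : Int) (out : List (Int × Int × Int × Int)) : Decidable (Spec_sort_by_grid_pos extremes n_cols out) := by unfold Spec_sort_by_grid_pos; infer_instance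

-- ===== CLAIM (what is proved, stated in full; the proofs are below) =====
def Claim_equal_sort_by_grid_pos : Prop := ∀ (extremes : List (Int × Int × Int × Int)) (n_cols : Int), Dom_sort_by_grid_pos extremes n_cols → Pre_sort_by_grid_pos extremes n_cols → Spec_sort_by_grid_pos extremes n_cols (sort_by_grid_pos extremes n_cols)

-- ===== LEMMAS AND PROOFS =====

-- inserting with two comparison functions that agree against the accumulator's members
theorem pvInsertBy_congr {α : Type} (b1 b2 : α → α → Bool) (x : α) :
    ∀ (acc : List α), (∀ a ∈ acc, b1 x a = b2 x a) →
    PySem.List.insertBy b1 x acc = PySem.List.insertBy b2 x acc := by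
  intro acc
  induction acc with
  | nil => intro _; rfl
  | cons y ys ih =>
    intro h
    simp only [PySem.List.insertBy]
    rw [h y (by simp)]
    by_cases hb : b2 x y = true
    · simp [hb]
    · simp only [Bool.not_eq_true] at hb
      simp [hb, ih (fun a ha => h a (by simp [ha]))]

-- STABILITY: on a list whose idx is strictly increasing, the stable sort by `key`
-- equals the sort by the lexicographic key (key, idx)
theorem pvSorted_foldl_lex {α κ : Type} [LinearOrder κ] (key : α → κ) (idx : α → Int) :
    ∀ (xs acc : List α), xs.Pairwise (fun a b => idx a < idx b) →
    (∀ a ∈ acc, ∀ x ∈ xs, idx a < idx x) →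
    xs.foldl (fun acc x => PySem.List.insertBy (fun a b => decide (key a < key b)) x acc) acc
      = xs.foldl (fun acc x => PySem.List.insertBy (fun a b => decide (toLex (key a, idx a) < toLex (key b, idx b))) x acc) acc := by
  intro xs
  induction xs with
  | nil => intro acc _ _; rfl
  | cons x xs ih =>
    intro acc hp hacc
    have hx : ∀ b ∈ xs, idx x < idx b := (List.pairwise_cons.mp hp).1
    have heq : PySem.List.insertBy (fun a b => decide (key a < key b)) x acc
        = PySem.List.insertBy (fun a b => decide (toLex (key a, idx a) < toLex (key b, idx b))) x acc := by
      apply pvInsertBy_congr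
      intro a ha
      have hlt : idx a < idx x := hacc a ha x (by simp)
      apply decide_eq_decide.mpr
      rw [Prod.Lex.toLex_lt_toLex]
      constructor
      · exact fun h => Or.inl h
      · rintro (h | ⟨_, h2⟩)
        · exact h
        · exact absurd h2 (by simp; omega)
    simp only [List.foldl_cons]
    rw [heq]
    refine ih _ (List.pairwise_cons.mp hp).2 ?_
    intro a ha z hz
    rcases (PySem.List.mem_insertBy _ x a acc).mp ha with h | h
    · subst h; exact hx z hz
    · exact hacc a h z (by simp [hz])

theorem pvSorted_eq_sorted_lex {α κ : Type} [LinearOrder κ] (key : α → κ) (idx : α → Int)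
    (xs : List α) (h : xs.Pairwise (fun a b => idx a < idx b)) :
    PySem.List.sorted xs key false = PySem.List.sorted xs (fun c => toLex (key c, idx c)) false := by
  simp only [PySem.List.sorted]
  exact pvSorted_foldl_lex key idx xs [] h (by simp)

-- sorted2 (Python tuple key) is sorted by the lexicographic key
theorem pvSorted2_eq_sorted_lex {α : Type} (xs : List α) (k1 k2 : α → Int) :
    PySem.List.sorted2 xs k1 k2 false = PySem.List.sorted xs (fun c => toLex (k1 c, k2 c)) false := by
  have hfun : (fun a b => decide (k1 a < k1 b) || (!decide (k1 b < k1 a) && decide (k2 a < k2 b)))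
      = (fun (a b : α) => decide (toLex (k1 a, k2 a) < toLex (k1 b, k2 b))) := by
    funext a b
    rw [Bool.eq_iff_iff]
    simp only [Bool.or_eq_true, Bool.and_eq_true, Bool.not_eq_true', decide_eq_true_eq,
      decide_eq_false_iff_not, Prod.Lex.toLex_lt_toLex]
    omega
  simp only [PySem.List.sorted2, PySem.List.sorted, Bool.false_eq_true, if_false, hfun]

-- the centroid list has strictly increasing third components (the enumerate indices)
theorem pvCentroids_pairwise_idx (extremes : List (Int × Int × Int × Int)) :
    (pvCentroids extremes).Pairwise (fun a b => a.2.2 < b.2.2) := by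
  unfold pvCentroids
  rw [List.pairwise_map]
  have h1 : (PySem.List.enumerate extremes 0).Pairwise (fun p q => p.1 < q.1) := by
    have h := PySem.List.pairwise_lt_pyRange_one 0 (0 + (extremes.length : Int))
    rw [← PySem.List.map_fst_enumerate] at h
    exact List.pairwise_map.mp h
  exact h1.imp (fun hab => hab)

-- Python indexing into the bins list: the effective (nonnegative) index of bins[i] is (i % n_cols)
theorem pvMod_eff (n_cols i : Int) (hn : 0 < n_cols) (h1 : -n_cols ≤ i) (h2 : i < n_cols) :
    PySem.Int.mod i n_cols = if 0 ≤ i then i else i + n_cols := by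
  rw [PySem.Int.mod_eq_emod_of_pos hn]
  by_cases hi : 0 ≤ i
  · simp [hi, Int.emod_eq_of_lt hi h2]
  · have h3 : (i + n_cols) % n_cols = i % n_cols := Int.add_emod_right i n_cols
    rw [← h3, Int.emod_eq_of_lt (by omega) (by omega)]
    simp [hi]

theorem pvPyGetD_range_map (n_cols : Int) (hn : 0 < n_cols) (F : Nat → List (Int × Int × Int))
    (i : Int) (h1 : -n_cols ≤ i) (h2 : i < n_cols) (d : List (Int × Int × Int)) :
    PySem.List.pyGetD ((List.range n_cols.toNat).map F) i d = F ((PySem.Int.mod i n_cols).toNat) := by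
  have hmod := pvMod_eff n_cols i hn h1 h2
  by_cases hi : 0 ≤ i
  · rw [PySem.List.pyGetD_eq_getElem _ d hi (by simp; omega)]
    rw [List.getElem_map, List.getElem_range]
    simp [hmod, hi]
  · set k := (-i).toNat with hkdef
    have hik : i = -(k : Int) := by omega
    rw [hik] at hmod ⊢
    rw [PySem.List.pyGetD_neg_natCast _ k d (by omega) (by simp; omega)]
    rw [List.getElem_map, List.getElem_range]
    rw [hmod, if_neg (by omega)]
    congr 1
    simp only [List.length_map, List.length_range]
    omega

theorem pvPySetD_range_map (n_cols : Int) (hn : 0 < n_cols) (F : Nat → List (Int × Int × Int))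
    (i : Int) (h1 : -n_cols ≤ i) (h2 : i < n_cols) (v : List (Int × Int × Int)) :
    PySem.List.pySetD ((List.range n_cols.toNat).map F) i v
      = (List.range n_cols.toNat).map
          (fun t => if t = (PySem.Int.mod i n_cols).toNat then v else F t) := by
  have hmod := pvMod_eff n_cols i hn h1 h2
  have hset : PySem.List.pySetD ((List.range n_cols.toNat).map F) i v
      = ((List.range n_cols.toNat).map F).set (PySem.Int.mod i n_cols).toNat v := by
    by_cases hi : 0 ≤ i
    · rw [PySem.List.pySetD_of_nonneg _ v hi]
      simp [hmod, hi]
    · simp only [PySem.List.pySetD, PySem.List.pySet?, PySem.List.pyIdx?, List.length_map,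
        List.length_range, if_neg hi, if_pos (show -(n_cols.toNat : Int) ≤ i by omega)]
      simp only [Option.map_some, Option.getD_some]
      congr 1
      simp only [hmod, if_neg hi]
      omega
  rw [hset]
  apply List.ext_getElem
  · simp
  · intro j hj hj'
    simp only [List.length_set, List.length_map, List.length_range] at hj
    rw [List.getElem_set, List.getElem_map, List.getElem_map, List.getElem_range]
    split_ifs with hA hB hB
    · rfl
    · omega
    · omega
    · rfl

-- characterisation of A's bin-distribution loop
theorem pvBins_foldl_eq (n_cols : Int) (hn : 0 < n_cols) (bidx : (Int × Int × Int) → Int) :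
    ∀ (cs : List (Int × Int × Int)) (F : Nat → List (Int × Int × Int)),
    (∀ c ∈ cs, -n_cols ≤ bidx c ∧ bidx c < n_cols) →
    cs.foldl (fun bins c => PySem.List.pySetD bins (bidx c)
        (PySem.List.pyGetD bins (bidx c) [] ++ [c])) ((List.range n_cols.toNat).map F)
      = (List.range n_cols.toNat).map
          (fun t => F t ++ cs.filter (fun c => decide ((PySem.Int.mod (bidx c) n_cols).toNat = t))) := by
  intro cs
  induction cs with
  | nil => intro F _; simp
  | cons c cs ih =>
    intro F hb
    have hc := hb c (by simp)
    simp only [List.foldl_cons]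
    rw [pvPyGetD_range_map n_cols hn F (bidx c) hc.1 hc.2,
        pvPySetD_range_map n_cols hn F (bidx c) hc.1 hc.2]
    set g := (PySem.Int.mod (bidx c) n_cols).toNat with hg
    have hstep : (List.range n_cols.toNat).map (fun t => if t = g then F g ++ [c] else F t)
        = (List.range n_cols.toNat).map (fun t => if t = g then F t ++ [c] else F t) := by
      apply List.map_congr_left
      intro t _
      by_cases ht : t = g
      · subst ht; simp
      · simp [ht]
    rw [hstep, ih _ (fun x hx => hb x (by simp [hx]))]
    apply List.map_congr_left
    intro t _
    rw [List.filter_cons]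
    by_cases ht : g = t
    · simp [ht, ← hg]
    · have h2 : ¬ t = g := fun h => ht h.symm
      simp [← hg, ht, h2]

theorem pvSum_ite_range (g k : Nat) : ∀ (n : Nat),
    ((List.range n).map (fun t => if g = t then k else 0)).sum = if g < n then k else 0 := by
  intro n
  induction n with
  | zero => simp
  | succ n ih =>
    rw [List.range_succ]
    simp only [List.map_append, List.sum_append, ih, List.map_cons, List.map_nil, List.sum_cons,
      List.sum_nil]
    split_ifs <;> omega

theorem pvFlatten_filter_pos {α : Type} (l : List (List α)) :
    (l.filter (fun b => decide (0 < b.length))).flatten = l.flatten := by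
  induction l with
  | nil => rfl
  | cons b l ih =>
    cases b with
    | nil => simpa using ih
    | cons x xs => simp [ih]

-- A's flattened, per-bin-sorted bin list is a permutation of the centroid list
theorem pvFlat_perm (n_cols bs : Int) (hn : 0 < n_cols) (cs : List (Int × Int × Int)) :
    (((((List.range n_cols.toNat).map
          (fun t => cs.filter (fun c => decide ((PySem.Int.mod (PySem.Int.floordiv c.2.1 bs) n_cols).toNat = t)))).filter
            (fun b => decide (0 < b.length))).map
          (fun b => PySem.List.sorted b (fun c => c.1) false)).flatten).Perm cs := by
  rw [List.perm_iff_count]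
  intro a
  rw [List.count_flatten, List.map_map]
  have h1 : (List.count a ∘ fun b => PySem.List.sorted b (fun c => c.1) false)
      = fun b : List (Int × Int × Int) => List.count a b := by
    funext b
    exact (PySem.List.sorted_perm b (fun c => c.1) false).count_eq a
  rw [h1, ← List.count_flatten, pvFlatten_filter_pos, List.count_flatten, List.map_map]
  have h2 : ∀ t ∈ List.range n_cols.toNat,
      (List.count a ∘ fun t => cs.filter (fun c => decide ((PySem.Int.mod (PySem.Int.floordiv c.2.1 bs) n_cols).toNat = t))) t
      = if (PySem.Int.mod (PySem.Int.floordiv a.2.1 bs) n_cols).toNat = t then List.count a cs else 0 := by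
    intro t _
    by_cases hga : (PySem.Int.mod (PySem.Int.floordiv a.2.1 bs) n_cols).toNat = t
    · simp only [Function.comp_apply, if_pos hga]
      exact List.count_filter (by simp [hga])
    · simp only [Function.comp_apply, if_neg hga]
      refine List.count_eq_zero.mpr ?_
      intro hm
      exact hga (by simpa using (List.mem_filter.mp hm).2)
  rw [List.map_congr_left h2, pvSum_ite_range]
  by_cases hmem : a ∈ cs
  · have hlt : (PySem.Int.mod (PySem.Int.floordiv a.2.1 bs) n_cols).toNat < n_cols.toNat := by
      have h1 := PySem.Int.mod_lt (PySem.Int.floordiv a.2.1 bs) hn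
      have h0 := PySem.Int.mod_nonneg (PySem.Int.floordiv a.2.1 bs) hn
      omega
    rw [if_pos hlt]
  · rw [List.count_eq_zero.mpr hmem]
    split <;> rfl

-- A's flattened, per-bin-sorted bin list is strictly increasing under the key ((bin, cx), idx)
theorem pvFlat_pairwise (n_cols bs : Int) (hn : 0 < n_cols) (cs : List (Int × Int × Int))
    (hidx : cs.Pairwise (fun a b => a.2.2 < b.2.2)) :
    (((((List.range n_cols.toNat).map
          (fun t => cs.filter (fun c => decide ((PySem.Int.mod (PySem.Int.floordiv c.2.1 bs) n_cols).toNat = t)))).filter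
            (fun b => decide (0 < b.length))).map
          (fun b => PySem.List.sorted b (fun c => c.1) false)).flatten).Pairwise
      (fun u v => (toLex (toLex (PySem.Int.mod (PySem.Int.floordiv u.2.1 bs) n_cols, u.1), u.2.2) : Lex (Lex (Int × Int) × Int))
        < toLex (toLex (PySem.Int.mod (PySem.Int.floordiv v.2.1 bs) n_cols, v.1), v.2.2)) := by
  rw [List.pairwise_flatten]
  constructor
  · -- inside each sorted bin
    intro l hl
    obtain ⟨b, hb2, rfl⟩ := List.mem_map.mp hl
    obtain ⟨t, _, rfl⟩ := List.mem_map.mp (List.mem_filter.mp hb2).1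
    have hbpw : (cs.filter (fun c => decide ((PySem.Int.mod (PySem.Int.floordiv c.2.1 bs) n_cols).toNat = t))).Pairwise
        (fun a b => a.2.2 < b.2.2) := List.Pairwise.sublist List.filter_sublist hidx
    rw [pvSorted_eq_sorted_lex (α := Int × Int × Int) (κ := Int) (fun c => c.1) (fun c => c.2.2) _ hbpw]
    have h1 := PySem.List.sorted_pairwise
      (cs.filter (fun c => decide ((PySem.Int.mod (PySem.Int.floordiv c.2.1 bs) n_cols).toNat = t)))
      (fun c => (toLex (c.1, c.2.2) : Lex (Int × Int)))
    have hne : (cs.filter (fun c => decide ((PySem.Int.mod (PySem.Int.floordiv c.2.1 bs) n_cols).toNat = t))).Pairwise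
        (fun u v => u.2.2 ≠ v.2.2) := hbpw.imp (fun h => ne_of_lt h)
    have h2 := ((PySem.List.sorted_perm _ (fun c => (toLex (c.1, c.2.2) : Lex (Int × Int))) false).pairwise_iff
      (fun h => h.symm)).mpr hne
    have h3 : ∀ x ∈ PySem.List.sorted
        (cs.filter (fun c => decide ((PySem.Int.mod (PySem.Int.floordiv c.2.1 bs) n_cols).toNat = t)))
        (fun c => (toLex (c.1, c.2.2) : Lex (Int × Int))) false,
        (PySem.Int.mod (PySem.Int.floordiv x.2.1 bs) n_cols).toNat = t := by
      intro x hx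
      have hm := (PySem.List.mem_sorted _ _ _ _).mp hx
      simpa using (List.mem_filter.mp hm).2
    refine List.Pairwise.imp_of_mem ?_ (h1.and h2)
    intro u v hu hv hruv
    obtain ⟨hle, hnuv⟩ := hruv
    have hju : 0 ≤ PySem.Int.mod (PySem.Int.floordiv u.2.1 bs) n_cols :=
      PySem.Int.mod_nonneg _ hn
    have hjv : 0 ≤ PySem.Int.mod (PySem.Int.floordiv v.2.1 bs) n_cols :=
      PySem.Int.mod_nonneg _ hn
    have hjt : PySem.Int.mod (PySem.Int.floordiv u.2.1 bs) n_cols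
        = PySem.Int.mod (PySem.Int.floordiv v.2.1 bs) n_cols := by
      have h3u := h3 u hu; have h3v := h3 v hv; omega
    rw [Prod.Lex.toLex_le_toLex] at hle
    rw [Prod.Lex.toLex_lt_toLex]
    rcases hle with h | ⟨he, hle2⟩
    · left
      rw [Prod.Lex.toLex_lt_toLex]
      right
      exact ⟨by rw [hjt], h⟩
    · right
      refine ⟨by rw [hjt, he], lt_of_le_of_ne hle2 hnuv⟩
  · -- across bins: earlier bins have strictly smaller bin index
    have hpB1 : ((List.range n_cols.toNat).map
        (fun t => cs.filter (fun c => decide ((PySem.Int.mod (PySem.Int.floordiv c.2.1 bs) n_cols).toNat = t)))).Pairwise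
        (fun b1 b2 => ∀ x ∈ b1, ∀ y ∈ b2,
          (PySem.Int.mod (PySem.Int.floordiv x.2.1 bs) n_cols).toNat
            < (PySem.Int.mod (PySem.Int.floordiv y.2.1 bs) n_cols).toNat) := by
      rw [List.pairwise_map]
      refine List.Pairwise.imp ?_ List.pairwise_lt_range
      intro t1 t2 hlt x hx y hy
      have hx2 : (PySem.Int.mod (PySem.Int.floordiv x.2.1 bs) n_cols).toNat = t1 := by
        simpa using (List.mem_filter.mp hx).2
      have hy2 : (PySem.Int.mod (PySem.Int.floordiv y.2.1 bs) n_cols).toNat = t2 := by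
        simpa using (List.mem_filter.mp hy).2
      omega
    have hpB2 := List.Pairwise.sublist
      (List.filter_sublist (p := fun b => decide (0 < b.length))) hpB1
    rw [List.pairwise_map]
    refine List.Pairwise.imp ?_ hpB2
    intro b1 b2 h x hx y hy
    have hgx := h x ((PySem.List.mem_sorted _ _ _ _).mp hx) y ((PySem.List.mem_sorted _ _ _ _).mp hy)
    have hju : 0 ≤ PySem.Int.mod (PySem.Int.floordiv x.2.1 bs) n_cols := PySem.Int.mod_nonneg _ hn
    have hjv : 0 ≤ PySem.Int.mod (PySem.Int.floordiv y.2.1 bs) n_cols := PySem.Int.mod_nonneg _ hn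
    rw [Prod.Lex.toLex_lt_toLex]
    left
    rw [Prod.Lex.toLex_lt_toLex]
    left
    omega

-- ===== VERDICT (by name: the statement is the Claim_ definition above) =====
theorem sort_by_grid_pos_spec : Claim_equal_sort_by_grid_pos := by
  intro extremes n_cols _ hpre
  obtain ⟨hne, hn1, hbs0, hbounds⟩ := hpre
  have hn : (0 : Int) < n_cols := hn1
  unfold Spec_sort_by_grid_pos sort_by_grid_pos sort_by_grid_pos_alt
  cases hmax : PySem.List.max? ((pvCentroids extremes).map (fun c => c.2.1)) (fun y => y) with
  | none =>
    exfalso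
    rw [PySem.List.max?_eq_none_iff] at hmax
    apply hne
    have hlen := congrArg List.length hmax
    simp [pvCentroids, PySem.List.length_enumerate] at hlen
    exact hlen
  | some m =>
    simp only [hmax]
    have hbsz : pvBinSize extremes n_cols = PySem.Int.floordiv m n_cols + 1 := by
      unfold pvBinSize; rw [hmax]
    rw [hbsz] at hbounds
    set bs := PySem.Int.floordiv m n_cols + 1 with hbs
    set cs := pvCentroids extremes with hcs
    have hidx : cs.Pairwise (fun a b => a.2.2 < b.2.2) := pvCentroids_pairwise_idx extremes
    -- the initial bins list, rebased on List.range
    have hbins0 : (PySem.List.pyRange 0 n_cols 1).map (fun _ => ([] : List (Int × Int × Int)))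
        = (List.range n_cols.toNat).map (fun _ => []) := by
      simp [PySem.List.pyRange_one, List.map_map, Function.comp_def, List.map_const']
    rw [hbins0]
    -- the distribution loop
    rw [pvBins_foldl_eq n_cols hn (fun c => PySem.Int.floordiv c.2.1 bs) cs (fun _ => []) hbounds]
    simp only [List.nil_append]
    -- drop the vacuous per-element guard, and fuse the two maps
    have hguard : ∀ bin ∈ (((List.range n_cols.toNat).map
          (fun t => cs.filter (fun c => decide ((PySem.Int.mod (PySem.Int.floordiv c.2.1 bs) n_cols).toNat = t)))).filter
            (fun b => decide (0 < b.length))).map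
          (fun b => PySem.List.sorted b (fun c => c.1) false),
        (bin.filter (fun _ => decide (0 < bin.length))).map (fun b => b.2.2) = bin.map (fun b => b.2.2) := by
      intro bin hbin
      obtain ⟨b, hb2, rfl⟩ := List.mem_map.mp hbin
      have hpos : 0 < b.length := by simpa using (List.mem_filter.mp hb2).2
      have hpos' : 0 < (PySem.List.sorted b (fun c => c.1) false).length := by
        rw [PySem.List.length_sorted]; exact hpos
      simp [hpos, List.filter_true]
    rw [List.flatMap_def, List.map_congr_left hguard, ← List.map_flatten]
    -- both sides are the same stable sort under the composite lexicographic key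
    have hA := PySem.List.sorted_eq_of_perm_of_pairwise_lt cs
      ((((List.range n_cols.toNat).map
          (fun t => cs.filter (fun c => decide ((PySem.Int.mod (PySem.Int.floordiv c.2.1 bs) n_cols).toNat = t)))).filter
            (fun b => decide (0 < b.length))).map
          (fun b => PySem.List.sorted b (fun c => c.1) false)).flatten
      (fun c => (toLex (toLex (PySem.Int.mod (PySem.Int.floordiv c.2.1 bs) n_cols, c.1), c.2.2) : Lex (Lex (Int × Int) × Int)))
      (pvFlat_perm n_cols bs hn cs) (pvFlat_pairwise n_cols bs hn cs hidx)
    have hB : PySem.List.sorted2 cs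
        (fun c => PySem.Int.mod (PySem.Int.floordiv c.2.1 bs) n_cols) (fun c => c.1) false
        = PySem.List.sorted cs
          (fun c => (toLex (toLex (PySem.Int.mod (PySem.Int.floordiv c.2.1 bs) n_cols, c.1), c.2.2) : Lex (Lex (Int × Int) × Int))) false := by
      rw [pvSorted2_eq_sorted_lex]
      exact pvSorted_eq_sorted_lex
        (fun c => (toLex (PySem.Int.mod (PySem.Int.floordiv c.2.1 bs) n_cols, c.1) : Lex (Int × Int)))
        (fun c => c.2.2) cs hidx
    rw [hB, ← hA, List.map_map]
    rfl
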